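-- pv_equiv track=rewrite | github.com/aakKel/fzucslabcode | mmv/map.py | bit_cnt
-- ===== SOURCE A (Python) =====
-- def bit_cnt(num,mx):
--     res = 0
--     a_list = []
--     for i in range(mx):
--         if (num >> i) & 1 == 1:
--             res += 1
--             a_list.append(i)
--     return res,a_list
-- ===== SOURCE B (Python) =====
-- def _set_bits(m):
--     # ascending positions of the set bits of m >= 0; one iteration per set bit
--     rev = []
--     while m:
--         p = m.bit_length() - 1
--         rev.append(p)
--         m -= 1 << p
--     return rev[::-1]
--
-- def _mask(x, mx):
--     # reduce a nonnegative x to its low mx bits (cheap when it already fits)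
--     return x if x.bit_length() <= mx else x % (1 << mx)
--
-- def _complement(zs, mx):
--     # all positions in [0, mx) not in the ascending list zs
--     lst = []
--     prev = 0
--     for z in zs:
--         lst.extend(range(prev, z))
--         prev = z + 1
--     lst.extend(range(prev, mx))
--     return lst
--
-- def bit_cnt(num, mx):
--     if mx <= 0:
--         return 0, []
--     if num >= 0:
--         lst = _set_bits(_mask(num, mx))
--         return len(lst), lst
--     # num < 0: bit i of num is the complement of bit i of ~num
--     lst = _complement(_set_bits(_mask(~num, mx)), mx)
--     return len(lst), lst
-- ===== Notes on version B (the rewrite author's own statement) =====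
-- stated objective: faster
-- what changed: Instead of testing every bit position 0..mx-1 in one loop, B reduces the input to its low mx bits and peels one set bit per iteration via bit_length; for negative num it peels the small complement ~num and emits the complementary ranges, so the work is proportional to the popcount/output, not to mx.
import Mathlib
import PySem

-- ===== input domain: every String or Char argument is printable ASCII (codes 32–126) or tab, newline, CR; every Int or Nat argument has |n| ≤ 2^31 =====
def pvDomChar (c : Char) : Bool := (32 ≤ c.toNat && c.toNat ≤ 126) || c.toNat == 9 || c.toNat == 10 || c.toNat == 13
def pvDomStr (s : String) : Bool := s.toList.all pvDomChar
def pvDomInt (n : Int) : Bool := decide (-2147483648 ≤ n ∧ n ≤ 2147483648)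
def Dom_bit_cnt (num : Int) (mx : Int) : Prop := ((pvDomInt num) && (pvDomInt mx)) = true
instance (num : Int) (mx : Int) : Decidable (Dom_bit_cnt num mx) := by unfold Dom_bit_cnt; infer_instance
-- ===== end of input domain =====

-- B replaces A's scan of all mx bit positions by one modular reduction plus a loop that peels
-- one set bit per iteration via bit_length (for negative num it peels ~num and emits the
-- complementary ranges), so the loop length is the popcount, not mx.


-- ===== PORT A =====
def bit_cnt (num : Int) (mx : Int) : Int × List Int :=
  (PySem.List.pyRange 0 mx 1).foldl
    (fun st i =>
      if PySem.Int.band (Int.shiftRight num i.toNat) 1 = 1 then (st.1 + 1, st.2 ++ [i]) else st)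
    (0, [])

-- ===== PORT B =====
-- termination helper, cited by bcLoop's decreasing_by
theorem bcLoop_dec (m : Int) (h : 0 < m) :
    (m - (1 : Int) <<< (PySem.Int.bitLength m - 1)).toNat < m.toNat := by
  have h1 : 2 ^ (PySem.Int.bitLength m - 1) ≤ m.natAbs :=
    PySem.Int.two_pow_bitLength_le m (by omega)
  have hk : ((2:Int) ^ (PySem.Int.bitLength m - 1)) ≤ m := by
    have h2 : ((2 ^ (PySem.Int.bitLength m - 1) : Nat) : Int) ≤ (m.natAbs : Int) := by
      exact_mod_cast h1
    rw [Int.natAbs_of_nonneg h.le] at h2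
    push_cast at h2
    exact h2
  have hp : (0:Int) < 2 ^ (PySem.Int.bitLength m - 1) := by positivity
  rw [Int.shiftLeft_eq, one_mul]
  omega

-- the 'while m:' loop of _set_bits: append bit_length(m)-1, subtract that bit, repeat
def bcLoop (m : Int) (rev : List Int) : List Int :=
  if h : 0 < m then
    bcLoop (m - (1 : Int) <<< (PySem.Int.bitLength m - 1))
      (rev ++ [((PySem.Int.bitLength m - 1 : Nat) : Int)])
  else rev
termination_by m.toNat
decreasing_by exact bcLoop_dec m h

-- _set_bits(m): rev[::-1] ported as List.reverse (exact)
def setBits (m : Int) : List Int := (bcLoop m []).reverse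

-- the 'for z in _set_bits(m): lst.extend(range(prev, z)); prev = z + 1' loop,
-- returning the final (lst, prev)
def mergeLoop : List Int → List Int → Int → List Int × Int
  | [], lst, prev => (lst, prev)
  | z :: zs, lst, prev => mergeLoop zs (lst ++ PySem.List.pyRange prev z 1) (z + 1)

-- _mask(x, mx): reduce a nonnegative x to its low mx bits (cheap when it already fits)
def maskLow (x : Int) (mx : Int) : Int :=
  if (PySem.Int.bitLength x : Int) ≤ mx then x
  else PySem.Int.mod x ((1 : Int) <<< mx.toNat)

-- _complement(zs, mx): all positions in [0, mx) not in the ascending list zs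
def complement (zs : List Int) (mx : Int) : List Int :=
  (mergeLoop zs [] 0).1 ++ PySem.List.pyRange (mergeLoop zs [] 0).2 mx 1

def bit_cnt_alt (num : Int) (mx : Int) : Int × List Int :=
  if mx ≤ 0 then (0, [])
  else if 0 ≤ num then
    (((setBits (maskLow num mx)).length : Int), setBits (maskLow num mx))
  else
    (((complement (setBits (maskLow (Int.not num) mx)) mx).length : Int),
      complement (setBits (maskLow (Int.not num) mx)) mx)

-- ===== PRECONDITION & SPEC =====
def Spec_bit_cnt (num : Int) (mx : Int) (out : Int × List Int) : Prop := out = bit_cnt_alt num mx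
instance (num : Int) (mx : Int) (out : Int × List Int) : Decidable (Spec_bit_cnt num mx out) := by unfold Spec_bit_cnt; infer_instance

-- ===== CLAIM (what is proved, stated in full; the proofs are below) =====
def Claim_equal_bit_cnt : Prop := ∀ (num : Int) (mx : Int), Dom_bit_cnt num mx → Spec_bit_cnt num mx (bit_cnt num mx)

-- ===== LEMMAS AND PROOFS =====

-- bit positions of n below t, as a Nat list: the common description of both results
def bitsN (t n : Nat) : List Nat := (List.range t).filter (fun i => n / 2^i % 2 == 1)

theorem pyRange_nil (a b : Int) (h : b ≤ a) : PySem.List.pyRange a b 1 = [] := by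
  simp [PySem.List.pyRange, show ¬ a < b by omega]

theorem pyRange_singleton (z : Int) : PySem.List.pyRange z (z+1) 1 = [z] := by
  rw [PySem.List.pyRange_one_cons (by omega)]
  simp [PySem.List.pyRange]

theorem pyRange_snoc (a b : Int) (h : a ≤ b) :
    PySem.List.pyRange a (b+1) 1 = PySem.List.pyRange a b 1 ++ [b] := by
  rw [PySem.List.pyRange_one_append a b (b+1) h (by omega), pyRange_singleton]

theorem pyRange_cast (t : Nat) :
    PySem.List.pyRange 0 (t : Int) 1 = (List.range t).map (Nat.cast : Nat → Int) := by
  rcases Nat.eq_zero_or_pos t with rfl | h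
  · simp [pyRange_nil 0 0 le_rfl]
  · simp only [PySem.List.pyRange]
    rw [if_neg (by norm_num), if_pos (by norm_num), if_pos (by exact_mod_cast h)]
    simp

theorem foldA (num : Int) (l : List Int) (c : Int) (acc : List Int) :
    l.foldl (fun st i =>
        if PySem.Int.band (Int.shiftRight num i.toNat) 1 = 1 then (st.1 + 1, st.2 ++ [i]) else st)
      (c, acc)
    = (c + ((l.filter (fun i => decide (PySem.Int.band (Int.shiftRight num i.toNat) 1 = 1))).length : Int),
       acc ++ l.filter (fun i => decide (PySem.Int.band (Int.shiftRight num i.toNat) 1 = 1))) := by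
  induction l generalizing c acc with
  | nil => simp
  | cons x xs ih =>
    rw [List.foldl_cons]
    by_cases hx : PySem.Int.band (Int.shiftRight num x.toNat) 1 = 1
    · rw [if_pos hx, ih, List.filter_cons_of_pos (by simpa using hx), List.length_cons]
      refine Prod.ext ?_ ?_
      · push_cast; ring
      · simp
    · rw [if_neg hx, ih, List.filter_cons_of_neg (by simpa using hx)]

theorem band_bit (x : Int) (i : Nat) :
    (PySem.Int.band (Int.shiftRight x i) 1 = 1) ↔ x / 2^i % 2 = 1 := by
  have hs : Int.shiftRight x i = x >>> i := rfl
  rw [hs, PySem.Int.band_one, Int.shiftRight_eq_div_pow]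
  have : PySem.Int.mod (x / (2^i : Nat)) 2 = (x / (2^i : Nat)) % 2 := by
    simp [pysem]
  rw [this]
  push_cast
  rfl

theorem maskBit (num : Int) (t i : Nat) (hit : i < t) :
    (num % (2:Int)^t) / 2^i % 2 = num / 2^i % 2 := by
  have hsplit : num = num % (2:Int)^t + (2^(t-i-1) * (num / 2^t) * 2) * 2^i := by
    have h2 : ((2:Int)^(t-i-1) * (num / 2^t) * 2) * 2^i = 2^t * (num / 2^t) := by
      have : (2:Int)^(t-i-1) * 2 * 2^i = 2^t := by
        rw [mul_comm ((2:Int)^(t-i-1)) 2, mul_assoc, ← pow_add, ← pow_succ']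
        congr 1
        omega
      calc ((2:Int)^(t-i-1) * (num / 2^t) * 2) * 2^i
          = (2^(t-i-1) * 2 * 2^i) * (num / 2^t) := by ring
        _ = 2^t * (num / 2^t) := by rw [this]
    have h3 := Int.mul_ediv_add_emod num ((2:Int)^t)
    omega
  conv_rhs => rw [hsplit]
  rw [Int.add_mul_ediv_right _ _ (by positivity : ((2:Int)^i) ≠ 0)]
  omega

-- Python's floor division flips bits under negation: bit i of -w-1 is the complement of bit i of w
theorem compBit (w : Int) (k : Nat) :
    ((-w-1) / 2^k % 2 = 1) ↔ ¬ (w / 2^k % 2 = 1) := by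
  have hb : (0:Int) < 2^k := by positivity
  have hqr := Int.mul_ediv_add_emod w ((2:Int)^k)
  have hr0 : 0 ≤ w % 2^k := Int.emod_nonneg w hb.ne'
  have hrb : w % 2^k < 2^k := Int.emod_lt_of_pos w hb
  have hdiv : (-w-1) / 2^k = -(w / 2^k) - 1 := by
    have h := (Int.ediv_emod_unique (a := -w-1) (b := 2^k)
      (q := -(w / 2^k) - 1) (r := 2^k - 1 - w % 2^k) hb).mpr ⟨by linarith [hqr], by omega, by omega⟩
    exact h.1
  rw [hdiv]
  omega

theorem bitsN_ext (n t t' : Nat) (h : n < 2^t) (htt : t ≤ t') : bitsN t' n = bitsN t n := by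
  obtain ⟨k, rfl⟩ := Nat.exists_eq_add_of_le htt
  induction k with
  | zero => rfl
  | succ k ih =>
    have : t + (k+1) = (t + k) + 1 := by omega
    rw [this]
    unfold bitsN
    rw [List.range_succ, List.filter_append]
    have hz : n / 2^(t+k) = 0 :=
      Nat.div_eq_of_lt (lt_of_lt_of_le h (Nat.pow_le_pow_right (by norm_num) (by omega)))
    simp [hz]
    exact ih (by omega)

theorem bl_le (n t : Nat) (h : n < 2^t) : PySem.Int.bitLength (n : Int) ≤ t := by
  by_contra hc
  push_neg at hc
  rcases Nat.eq_zero_or_pos n with rfl | hn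
  · rw [show ((0:Nat):Int) = 0 by norm_num, PySem.Int.bitLength_zero] at hc
    omega
  · have h1 := PySem.Int.two_pow_bitLength_le (n : Int) (by exact_mod_cast hn.ne')
    rw [Int.natAbs_natCast] at h1
    have : 2^t ≤ 2^(PySem.Int.bitLength (n:Int) - 1) := Nat.pow_le_pow_right (by norm_num) (by omega)
    omega

theorem bcLoop_spec (n : Nat) (acc : List Int) :
    bcLoop (n : Int) acc
      = acc ++ ((bitsN (PySem.Int.bitLength (n : Int)) n).map (Nat.cast : Nat → Int)).reverse := by
  induction n using Nat.strong_induction_on generalizing acc with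
  | _ n ih =>
  rcases Nat.eq_zero_or_pos n with rfl | hn
  · rw [bcLoop]
    rw [dif_neg (by norm_num)]
    rw [show ((0:Nat):Int) = 0 by norm_num, PySem.Int.bitLength_zero]
    simp [bitsN]
  · have hn0 : ((n:Int)) ≠ 0 := by exact_mod_cast hn.ne'
    have hpos : (0:Int) < (n:Int) := by exact_mod_cast hn
    set L := PySem.Int.bitLength (n : Int) with hL
    have hlow : 2 ^ (L - 1) ≤ n := by
      have := PySem.Int.two_pow_bitLength_le (n:Int) hn0
      rwa [Int.natAbs_natCast] at this
    have hhigh : n < 2 ^ L := by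
      have := PySem.Int.lt_two_pow_bitLength (n:Int)
      rwa [Int.natAbs_natCast] at this
    have hL1 : 1 ≤ L := by
      by_contra hc
      have : L = 0 := by omega
      rw [this] at hhigh
      omega
    set p := L - 1 with hp
    set n' := n - 2^p with hn'
    have hlt : n' < 2^p := by
      have : n < 2^(p+1) := by
        have : p + 1 = L := by omega
        rw [this]; exact hhigh
      have h2 : (2:Nat)^(p+1) = 2^p + 2^p := by ring
      omega
    have hcast : (n:Int) - (1:Int) <<< (PySem.Int.bitLength (n:Int) - 1) = ((n' : Nat) : Int) := by
      rw [Int.shiftLeft_eq, one_mul, ← hL]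
      push_cast [hn', Nat.cast_sub hlow]
      ring
    rw [bcLoop, dif_pos hpos, hcast, ih n' (by have h2 := Nat.two_pow_pos p; omega) _]
    have hbits : bitsN L n = bitsN p n' ++ [p] := by
      have hLp : L = p + 1 := by omega
      rw [hLp]
      unfold bitsN
      rw [List.range_succ, List.filter_append]
      have hdiv : n / 2^p = 1 := Nat.div_eq_of_lt_le (by simpa using hlow) (by simpa [two_mul] using (by omega : n < 2^p + 2^p))
      have hfil : (List.range p).filter (fun i => n / 2^i % 2 == 1)
          = (List.range p).filter (fun i => n' / 2^i % 2 == 1) := by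
        apply List.filter_congr
        intro i hi
        have hip : i < p := List.mem_range.mp hi
        have hsplit : n = n' + (2^(p-i-1) * 2) * 2^i := by
          have : (2:Nat)^(p-i-1) * 2 * 2^i = 2^p := by
            rw [mul_comm ((2:Nat)^(p-i-1)) 2, mul_assoc, ← pow_add, ← pow_succ']
            congr 1
            omega
          omega
        have : n / 2^i % 2 = n' / 2^i % 2 := by
          conv_lhs => rw [hsplit]
          rw [Nat.add_mul_div_right _ _ (by positivity : 0 < 2^i)]
          omega
        simp [this]
      simp [hfil, hdiv]
    rw [hbits]
    have hblt : n' < 2 ^ PySem.Int.bitLength ((n':Nat) : Int) := by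
      have := PySem.Int.lt_two_pow_bitLength ((n':Nat):Int)
      rwa [Int.natAbs_natCast] at this
    have hext : bitsN (PySem.Int.bitLength ((n':Nat) : Int)) n' = bitsN p n' :=
      (bitsN_ext n' _ p hblt (bl_le n' p hlt)).symm
    rw [hext]
    simp
    omega

-- setBits on a masked nonnegative value lists exactly the set-bit positions below t
theorem setBits_spec (nv t : Nat) (hnl : nv < 2^t) :
    setBits ((nv : Nat) : Int) = (bitsN t nv).map (Nat.cast : Nat → Int) := by
  unfold setBits
  rw [bcLoop_spec nv []]
  have hblt : nv < 2 ^ PySem.Int.bitLength ((nv:Nat) : Int) := by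
    have := PySem.Int.lt_two_pow_bitLength ((nv:Nat):Int)
    rwa [Int.natAbs_natCast] at this
  have hbits_eq : bitsN (PySem.Int.bitLength ((nv:Nat) : Int)) nv = bitsN t nv := by
    rcases Nat.le_total (PySem.Int.bitLength ((nv:Nat):Int)) t with hle | hle
    · exact (bitsN_ext nv _ t hblt hle).symm
    · exact bitsN_ext nv t _ hnl hle
  rw [List.nil_append, List.reverse_reverse, hbits_eq]

-- the masking helper of B yields the low t bits of x, as a Nat
theorem maskVal (x : Int) (hx : 0 ≤ x) (t : Nat) :
    maskLow x (t : Int) = (((x % (2:Int)^t).toNat : Nat) : Int) := by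
  unfold maskLow
  rw [Int.toNat_natCast]
  have hM0 : 0 ≤ x % (2:Int)^t := Int.emod_nonneg x (by positivity)
  rw [Int.toNat_of_nonneg hM0]
  split_ifs with hcond
  · have h1 := PySem.Int.lt_two_pow_bitLength x
    have h2 : PySem.Int.bitLength x ≤ t := by exact_mod_cast hcond
    have h3 : (2:Nat)^(PySem.Int.bitLength x) ≤ 2^t := Nat.pow_le_pow_right (by norm_num) h2
    have h5 : ((x.natAbs : Int)) < ((2^t : Nat) : Int) := by exact_mod_cast lt_of_lt_of_le h1 h3
    rw [show (((2^t : Nat)) : Int) = (2:Int)^t by push_cast; rfl] at h5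
    rw [Int.emod_eq_of_lt hx (by omega)]
  · have hsh : ((1:Int) <<< t) = (2:Int)^t := by
      rw [Int.shiftLeft_eq, one_mul]
    rw [hsh]
    have hfm : PySem.Int.mod x ((2:Int)^t) = Int.fmod x ((2:Int)^t) := rfl
    rw [hfm, Int.fmod_eq_emod]
    simp [show (0:Int) ≤ 2^t by positivity]

-- composing mergeLoop over an appended zero list
theorem mergeLoop_append (xs ys : List Int) (lst : List Int) (prev : Int) :
    mergeLoop (xs ++ ys) lst prev
      = mergeLoop ys (mergeLoop xs lst prev).1 (mergeLoop xs lst prev).2 := by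
  induction xs generalizing lst prev with
  | nil => rfl
  | cons x xs ih => simp [mergeLoop, ih]

-- the merge loop emits exactly the complement of the (ascending) zero list below t
theorem mergeSpec (q : Nat → Bool) (t : Nat) :
    (mergeLoop (((List.range t).filter q).map (Nat.cast : Nat → Int)) [] 0).1
        ++ PySem.List.pyRange (mergeLoop (((List.range t).filter q).map (Nat.cast : Nat → Int)) [] 0).2 (t : Int) 1
      = ((List.range t).filter (fun i => !q i)).map (Nat.cast : Nat → Int)
    ∧ 0 ≤ (mergeLoop (((List.range t).filter q).map (Nat.cast : Nat → Int)) [] 0).2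
    ∧ (mergeLoop (((List.range t).filter q).map (Nat.cast : Nat → Int)) [] 0).2 ≤ (t : Int) := by
  induction t with
  | zero =>
    refine ⟨?_, by simp [mergeLoop], by simp [mergeLoop]⟩
    simp [mergeLoop, pyRange_nil 0 0 le_rfl]
  | succ t ih =>
    obtain ⟨ih1, ih2, ih3⟩ := ih
    rw [List.range_succ, List.filter_append, List.filter_append, List.map_append]
    have hcast : ((t+1 : Nat) : Int) = (t : Int) + 1 := by push_cast; ring
    by_cases hq : q t = true
    · simp only [List.filter_singleton, hq, Bool.not_true, cond_true, cond_false,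
        List.map_cons, List.map_nil, List.append_nil]
      rw [mergeLoop_append]
      simp only [mergeLoop]
      refine ⟨?_, by omega, by omega⟩
      rw [hcast, pyRange_nil ((t:Int)+1) ((t:Int)+1) le_rfl, List.append_nil]
      exact ih1
    · rw [Bool.not_eq_true] at hq
      simp only [List.filter_singleton, hq, Bool.not_false, cond_true, cond_false,
        List.map_cons, List.map_nil, List.append_nil, List.map_append]
      refine ⟨?_, ih2, by omega⟩
      rw [hcast, pyRange_snoc _ _ ih3, ← List.append_assoc, ih1]

theorem complementSpec (q : Nat → Bool) (t : Nat) :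
    complement (((List.range t).filter q).map (Nat.cast : Nat → Int)) (t : Int)
      = ((List.range t).filter (fun i => !q i)).map (Nat.cast : Nat → Int) := by
  unfold complement
  exact (mergeSpec q t).1

-- ===== VERDICT (by name: the statement is the Claim_ definition above) =====
theorem bit_cnt_spec : Claim_equal_bit_cnt := by
  intro num mx _
  unfold Spec_bit_cnt bit_cnt bit_cnt_alt
  by_cases hmx : mx ≤ 0
  · rw [if_pos hmx, pyRange_nil 0 mx hmx]
    simp
  · rw [if_neg hmx]
    push_neg at hmx
    set t := mx.toNat with htdef
    have htmx : (t:Int) = mx := Int.toNat_of_nonneg (by omega)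
    rw [← htmx, pyRange_cast, foldA, List.filter_map]
    by_cases hnum : 0 ≤ num
    · rw [if_pos hnum]
      set n : Nat := (num % (2:Int)^t).toNat with hndef
      have hMn : num % (2:Int)^t = (n:Int) :=
        (Int.toNat_of_nonneg (Int.emod_nonneg num (by positivity))).symm
      have hnlt : n < 2 ^ t := by
        have := Int.emod_lt_of_pos num (show (0:Int) < 2^t by positivity)
        rw [hMn] at this
        exact_mod_cast this
      rw [maskVal num hnum t, ← hndef, setBits_spec n t hnlt]
      have hfil : (List.range t).filter
          ((fun i => decide (PySem.Int.band (Int.shiftRight num i.toNat) 1 = 1)) ∘ (Nat.cast : Nat → Int))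
          = bitsN t n := by
        unfold bitsN
        apply List.filter_congr
        intro j hj
        have hjt : j < t := List.mem_range.mp hj
        simp only [Function.comp_apply, Int.toNat_natCast]
        have h1 : (PySem.Int.band (Int.shiftRight num j) 1 = 1) ↔ (n / 2^j % 2 = 1) := by
          rw [band_bit, ← maskBit num t j hjt, hMn]
          constructor
          · intro h; exact_mod_cast h
          · intro h; exact_mod_cast h
        rw [Bool.eq_iff_iff]
        simp [h1]
      rw [hfil]
      simp
    · rw [if_neg hnum]
      set w : Int := Int.not num with hwdef
      have hw : w = -num - 1 := by
        rw [hwdef]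
        cases num with
        | ofNat n =>
          show Int.negSucc n = -Int.ofNat n - 1
          rw [Int.negSucc_eq]
          push_cast
          simp [Int.ofNat_eq_natCast]
          omega
        | negSucc n =>
          show Int.ofNat n = -Int.negSucc n - 1
          rw [Int.negSucc_eq]
          push_cast
          simp [Int.ofNat_eq_natCast]
      have hw0 : 0 ≤ w := by omega
      set nw : Nat := (w % (2:Int)^t).toNat with hnwdef
      have hMn : w % (2:Int)^t = (nw:Int) :=
        (Int.toNat_of_nonneg (Int.emod_nonneg w (by positivity))).symm
      have hnlt : nw < 2 ^ t := by
        have := Int.emod_lt_of_pos w (show (0:Int) < 2^t by positivity)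
        rw [hMn] at this
        exact_mod_cast this
      rw [maskVal w hw0 t, ← hnwdef, setBits_spec nw t hnlt]
      have hfil : (List.range t).filter
          ((fun i => decide (PySem.Int.band (Int.shiftRight num i.toNat) 1 = 1)) ∘ (Nat.cast : Nat → Int))
          = (List.range t).filter (fun i => !(nw / 2^i % 2 == 1)) := by
        apply List.filter_congr
        intro j hj
        have hjt : j < t := List.mem_range.mp hj
        simp only [Function.comp_apply, Int.toNat_natCast]
        have h1 : (PySem.Int.band (Int.shiftRight num j) 1 = 1) ↔ ¬ (nw / 2^j % 2 = 1) := by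
          rw [band_bit]
          rw [show num = -w - 1 by omega, compBit w j, ← maskBit w t j hjt, hMn]
          constructor
          · intro h hc
            exact h (by exact_mod_cast hc)
          · intro h hc
            exact h (by exact_mod_cast hc)
        rw [Bool.eq_iff_iff]
        simp [h1]
      rw [hfil]
      have hbq : bitsN t nw = (List.range t).filter (fun i => nw / 2^i % 2 == 1) := rfl
      rw [hbq, complementSpec (fun i => nw / 2^i % 2 == 1) t]
      simp
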